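-- pv_equiv track=rewrite | github.com/pymmcore-plus/pymmcore-widgets | src/pymmcore_widgets/_mda/_positions_table_widget.py | _update_number
-- ===== SOURCE A (Python) =====
-- def _update_number(number: int, exixting_numbers: list[int]) -> int:
--     loop = True
--     while loop:
--         if number in exixting_numbers:
--             number += 1
--         else:
--             loop = False
--     return number
-- ===== SOURCE B (Python) =====
-- def _update_number(number: int, exixting_numbers: list[int]) -> int:
--     candidate = number
--     for v in sorted(x for x in exixting_numbers if x >= number):
--         if v == candidate:
--             candidate += 1
--         elif v > candidate:
--             break
--     return candidate
-- ===== Notes on version B (the rewrite author's own statement) =====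
-- stated objective: alternative
-- what changed: Replaces the while-loop that rescans the whole list for membership on every increment with a sort of the relevant (>= number) values followed by a single early-exit scan with a running candidate.
import Mathlib
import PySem

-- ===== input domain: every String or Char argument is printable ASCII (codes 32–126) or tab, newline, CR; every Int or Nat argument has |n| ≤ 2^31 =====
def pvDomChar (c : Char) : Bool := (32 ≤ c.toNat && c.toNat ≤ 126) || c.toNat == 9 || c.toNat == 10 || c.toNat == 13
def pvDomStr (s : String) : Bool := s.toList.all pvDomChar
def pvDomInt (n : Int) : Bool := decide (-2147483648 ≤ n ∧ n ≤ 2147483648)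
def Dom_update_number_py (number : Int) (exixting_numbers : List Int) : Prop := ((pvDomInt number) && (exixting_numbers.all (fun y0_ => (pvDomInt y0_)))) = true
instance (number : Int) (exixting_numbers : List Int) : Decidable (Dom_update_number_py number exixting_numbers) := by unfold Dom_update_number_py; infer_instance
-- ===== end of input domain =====

-- B replaces A's while-loop (which rescans the whole list for membership after each
-- increment) by a different algorithm: one sort of the values ≥ number followed by a
-- single early-exit scan (similar overall cost on typical inputs).

-- ===== PORT A =====
-- termination measure for A's while-loop: the number of list elements ≥ number
-- strictly drops each time number (which is in the list) is incremented.
theorem pvA_filter_mono (n : Int) (xs : List Int) :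
    (xs.filter (fun x => decide (n + 1 ≤ x))).length ≤ (xs.filter (fun x => decide (n ≤ x))).length := by
  induction xs with
  | nil => simp
  | cons x t ih =>
    simp only [List.filter_cons]
    split_ifs with h1 h2 h2 <;> simp_all <;> omega

theorem pvA_filter_lt (n : Int) (xs : List Int) (h : n ∈ xs) :
    (xs.filter (fun x => decide (n + 1 ≤ x))).length < (xs.filter (fun x => decide (n ≤ x))).length := by
  induction xs with
  | nil => cases h
  | cons x t ih =>
    simp only [List.filter_cons]
    rcases List.mem_cons.mp h with heq | hm
    · have := pvA_filter_mono n t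
      split_ifs with h1 h2 h2 <;> simp_all <;> omega
    · have := ih hm
      split_ifs with h1 h2 h2 <;> simp_all <;> omega

-- A: `while number in exixting_numbers: number += 1; return number`
def update_number_py (number : Int) (exixting_numbers : List Int) : Int :=
  if number ∈ exixting_numbers then
    update_number_py (number + 1) exixting_numbers
  else
    number
termination_by (exixting_numbers.filter (fun x => decide (number ≤ x))).length
decreasing_by exact pvA_filter_lt number exixting_numbers (by assumption)

-- ===== PORT B =====
-- B's for-loop over the sorted filtered values, with the `break` as an early return.
def pvB_scan (cand : Int) : List Int → Int
  | [] => cand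
  | v :: rest =>
    if v = cand then pvB_scan (cand + 1) rest
    else if cand < v then cand
    else pvB_scan cand rest

def update_number_py_alt (number : Int) (exixting_numbers : List Int) : Int :=
  pvB_scan number
    (PySem.List.sorted (exixting_numbers.filter (fun x => decide (number ≤ x))) (fun x => x) false)

-- ===== PRECONDITION & SPEC =====
def Spec_update_number_py (number : Int) (exixting_numbers : List Int) (out : Int) : Prop := out = update_number_py_alt number exixting_numbers
instance (number : Int) (exixting_numbers : List Int) (out : Int) : Decidable (Spec_update_number_py number exixting_numbers out) := by unfold Spec_update_number_py; infer_instance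

-- ===== CLAIM (what is proved, stated in full; the proofs are below) =====
def Claim_equal_update_number_py : Prop := ∀ (number : Int) (exixting_numbers : List Int), Dom_update_number_py number exixting_numbers → Spec_update_number_py number exixting_numbers (update_number_py number exixting_numbers)

-- ===== LEMMAS AND PROOFS =====

-- both programs compute the least m ≥ n not in the (relevant part of the) list;
-- pvIsLeast captures that characterisation.
def pvIsLeast (n r : Int) (xs : List Int) : Prop :=
  n ≤ r ∧ r ∉ xs ∧ ∀ m, n ≤ m → m < r → m ∈ xs

theorem pvIsLeast_unique {n r₁ r₂ : Int} {xs : List Int}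
    (h₁ : pvIsLeast n r₁ xs) (h₂ : pvIsLeast n r₂ xs) : r₁ = r₂ := by
  obtain ⟨hn₁, hout₁, hin₁⟩ := h₁
  obtain ⟨hn₂, hout₂, hin₂⟩ := h₂
  rcases lt_trichotomy r₁ r₂ with h | h | h
  · exact absurd (hin₂ r₁ hn₁ h) hout₁
  · exact h
  · exact absurd (hin₁ r₂ hn₂ h) hout₂

theorem pvA_isLeast (n : Int) (xs : List Int) : pvIsLeast n (update_number_py n xs) xs := by
  induction n using update_number_py.induct (exixting_numbers := xs) with
  | case1 n h ih =>
    obtain ⟨hle, hout, hin⟩ := ih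
    rw [update_number_py, if_pos h]
    refine ⟨by omega, hout, ?_⟩
    intro m hm hlt
    rcases eq_or_lt_of_le hm with rfl | hlt'
    · exact h
    · exact hin m (by omega) hlt
  | case2 n h =>
    rw [update_number_py, if_neg h]
    exact ⟨le_refl n, h, fun m hm hlt => absurd (lt_of_le_of_lt hm hlt) (lt_irrefl n)⟩

theorem pvB_scan_isLeast (cand : Int) (l : List Int)
    (hs : l.Pairwise (fun a b => a ≤ b)) : pvIsLeast cand (pvB_scan cand l) l := by
  induction l generalizing cand with
  | nil =>
    exact ⟨le_refl cand, by simp [pvB_scan], fun m hm hlt => by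
      simp [pvB_scan] at hlt; omega⟩
  | cons v rest ih =>
    have hrest : rest.Pairwise (fun a b => a ≤ b) := (List.pairwise_cons.mp hs).2
    have hhead : ∀ y ∈ rest, v ≤ y := (List.pairwise_cons.mp hs).1
    by_cases h1 : v = cand
    · subst h1
      obtain ⟨hle, hout, hin⟩ := ih (v + 1) hrest
      rw [pvB_scan, if_pos rfl]
      refine ⟨by omega, ?_, ?_⟩
      · intro hmem
        rcases List.mem_cons.mp hmem with heq | hmem'
        · omega
        · exact hout hmem'
      · intro m hm hlt
        rcases eq_or_lt_of_le hm with rfl | hlt'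
        · exact List.mem_cons_self
        · exact List.mem_cons_of_mem v (hin m (by omega) hlt)
    · by_cases h2 : cand < v
      · rw [pvB_scan, if_neg h1, if_pos h2]
        refine ⟨le_refl cand, ?_, fun m hm hlt => absurd (lt_of_le_of_lt hm hlt) (lt_irrefl cand)⟩
        intro hmem
        rcases List.mem_cons.mp hmem with heq | hmem'
        · omega
        · have := hhead cand hmem'; omega
      · obtain ⟨hle, hout, hin⟩ := ih cand hrest
        rw [pvB_scan, if_neg h1, if_neg h2]
        refine ⟨hle, ?_, ?_⟩
        · intro hmem
          rcases List.mem_cons.mp hmem with heq | hmem'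
          · omega
          · exact hout hmem'
        · intro m hm hlt
          exact List.mem_cons_of_mem v (hin m hm hlt)

theorem pvB_isLeast (n : Int) (xs : List Int) : pvIsLeast n (update_number_py_alt n xs) xs := by
  set l := PySem.List.sorted (xs.filter (fun x => decide (n ≤ x))) (fun x => x) false with hl
  have hmem : ∀ m : Int, m ∈ l ↔ (m ∈ xs ∧ n ≤ m) := by
    intro m
    rw [hl, PySem.List.mem_sorted, List.mem_filter]
    simp
  have hs : l.Pairwise (fun a b => a ≤ b) := by
    have := PySem.List.sorted_pairwise (xs.filter (fun x => decide (n ≤ x))) (fun x : Int => x)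
    simpa [hl] using this
  obtain ⟨hle, hout, hin⟩ := pvB_scan_isLeast n l hs
  refine ⟨hle, ?_, ?_⟩
  · intro hmem'
    exact hout ((hmem _).mpr ⟨hmem', hle⟩)
  · intro m hm hlt
    exact ((hmem m).mp (hin m hm hlt)).1

-- ===== VERDICT (by name: the statement is the Claim_ definition above) =====
theorem update_number_py_spec : Claim_equal_update_number_py := by
  intro number xs _
  unfold Spec_update_number_py
  exact pvIsLeast_unique (pvA_isLeast number xs) (pvB_isLeast number xs)
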